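-- pv_equiv track=rewrite | github.com/usoderst/Apriori | A_Improved.py | Compare_Candidate_Sets_to_DataBase
-- ===== SOURCE A (Python) =====
-- import itertools
--
-- def Compare_Candidate_Sets_to_DataBase (Data_base, Candidate_item_sets, Set_Length, min_sup):
--     Frequent_Item_Sets = []
--     PossibleSets = []
--     for item in Data_base:
--         for L in range(Set_Length, Set_Length+1):
--             for subset in itertools.combinations(item, L):
--                 if subset in Candidate_item_sets:
--                     Candidate_item_sets[subset] = (Candidate_item_sets[subset] + 1)
--     return Candidate_item_sets
-- ===== SOURCE B (Python) =====
-- import itertools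
--
-- def Compare_Candidate_Sets_to_DataBase(Data_base, Candidate_item_sets, Set_Length, min_sup):
--     counts = {}
--     for item in Data_base:
--         for combo in itertools.combinations(item, Set_Length):
--             counts[combo] = counts.get(combo, 0) + 1
--     for key in Candidate_item_sets:
--         Candidate_item_sets[key] = Candidate_item_sets[key] + counts.get(key, 0)
--     return Candidate_item_sets
-- ===== Notes on version B (the rewrite author's own statement) =====
-- stated objective: alternative
-- what changed: Instead of testing each combination against the candidate dict inside the transaction loop, B first tallies every length-Set_Length combination of every transaction into a counter dict, then in a separate pass adds the counter lookup to each existing candidate key.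
import Mathlib
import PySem

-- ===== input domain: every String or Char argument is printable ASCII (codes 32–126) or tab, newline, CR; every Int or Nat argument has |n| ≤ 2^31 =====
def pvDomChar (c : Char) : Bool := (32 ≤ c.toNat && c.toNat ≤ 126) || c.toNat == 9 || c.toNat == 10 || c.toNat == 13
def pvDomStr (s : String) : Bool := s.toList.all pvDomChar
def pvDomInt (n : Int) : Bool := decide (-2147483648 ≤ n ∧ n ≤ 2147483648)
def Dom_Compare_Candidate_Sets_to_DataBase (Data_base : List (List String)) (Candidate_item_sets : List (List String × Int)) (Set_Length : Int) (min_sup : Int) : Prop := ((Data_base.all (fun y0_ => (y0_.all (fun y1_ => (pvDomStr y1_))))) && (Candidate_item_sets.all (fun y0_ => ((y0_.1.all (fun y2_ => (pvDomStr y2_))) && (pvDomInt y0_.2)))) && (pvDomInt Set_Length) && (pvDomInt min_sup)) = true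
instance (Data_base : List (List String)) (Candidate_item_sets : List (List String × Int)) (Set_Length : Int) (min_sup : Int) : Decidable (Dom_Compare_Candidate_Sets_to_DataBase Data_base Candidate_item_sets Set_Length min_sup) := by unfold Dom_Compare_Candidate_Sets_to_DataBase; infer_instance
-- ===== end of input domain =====

-- B recomputes the same counts by first tallying ALL length-Set_Length combinations into one
-- counter dict, then adding counter lookups to each candidate key in a second pass (alternative
-- decomposition, same asymptotic cost).


-- ===== PORT A =====
-- itertools.combinations(xs, k) in Python's emission order (position-lexicographic); exact for k ≥ 0
def pyCombinations {α : Type} (xs : List α) (k : Nat) : List (List α) :=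
  match k, xs with
  | 0, _ => [[]]
  | _ + 1, [] => []
  | k + 1, x :: rest => (pyCombinations rest k).map (x :: ·) ++ pyCombinations rest (k + 1)

-- the body of A's innermost loop: 'if subset in Candidate_item_sets: Candidate_item_sets[subset] += 1'
def cssStepA (d : PySem.Dict (List String) Int) (subset : List String) : PySem.Dict (List String) Int :=
  match d.get? subset with
  | some v => d.insert subset (v + 1)
  | none => d

def Compare_Candidate_Sets_to_DataBase (Data_base : List (List String)) (Candidate_item_sets : List (List String × Int)) (Set_Length : Int) (min_sup : Int) : List (List String × Int) :=
  (Data_base.foldl (fun d item =>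
      (PySem.List.pyRange Set_Length (Set_Length + 1) 1).foldl (fun d L =>
        (pyCombinations item L.toNat).foldl cssStepA d) d)
    (PySem.Dict.mk Candidate_item_sets)).items

-- ===== PORT B =====
def Compare_Candidate_Sets_to_DataBase_alt (Data_base : List (List String)) (Candidate_item_sets : List (List String × Int)) (Set_Length : Int) (min_sup : Int) : List (List String × Int) :=
  let counts : PySem.Dict (List String) Int :=
    Data_base.foldl (fun c item =>
      (pyCombinations item Set_Length.toNat).foldl
        (fun c combo => c.insert combo (c.getD combo 0 + 1)) c) PySem.Dict.empty
  let d0 := PySem.Dict.mk Candidate_item_sets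
  (d0.keys.foldl (fun d key => d.insert key (d.getD key 0 + counts.getD key 0)) d0).items

-- ===== PRECONDITION & SPEC =====
-- Pre_ excludes (a) negative Set_Length with a nonempty database, where A (and B) raise ValueError from
-- itertools.combinations, and (b) candidate lists with duplicate keys, which do not represent a Python
-- dict (the argument's type) — first-match association-list reads there are an artefact of the encoding.
def Pre_Compare_Candidate_Sets_to_DataBase (Data_base : List (List String)) (Candidate_item_sets : List (List String × Int)) (Set_Length : Int) (min_sup : Int) : Prop :=
  (Data_base = [] ∨ 0 ≤ Set_Length) ∧ (Candidate_item_sets.map Prod.fst).Nodup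
instance (Data_base : List (List String)) (Candidate_item_sets : List (List String × Int)) (Set_Length : Int) (min_sup : Int) : Decidable (Pre_Compare_Candidate_Sets_to_DataBase Data_base Candidate_item_sets Set_Length min_sup) := by unfold Pre_Compare_Candidate_Sets_to_DataBase; infer_instance

def pvWitness_Compare_Candidate_Sets_to_DataBase : List (List String) × (List (List String × Int)) × Int × Int :=
  ([["a", "b"], ["b"]], [([ "a" ], 0), ([ "b" ], 1)], 1, 0)

def Spec_Compare_Candidate_Sets_to_DataBase (Data_base : List (List String)) (Candidate_item_sets : List (List String × Int)) (Set_Length : Int) (min_sup : Int) (out : List (List String × Int)) : Prop := out = Compare_Candidate_Sets_to_DataBase_alt Data_base Candidate_item_sets Set_Length min_sup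
instance (Data_base : List (List String)) (Candidate_item_sets : List (List String × Int)) (Set_Length : Int) (min_sup : Int) (out : List (List String × Int)) : Decidable (Spec_Compare_Candidate_Sets_to_DataBase Data_base Candidate_item_sets Set_Length min_sup out) := by unfold Spec_Compare_Candidate_Sets_to_DataBase; infer_instance

-- ===== CLAIM (what is proved, stated in full; the proofs are below) =====
def Claim_equal_Compare_Candidate_Sets_to_DataBase : Prop := ∀ (Data_base : List (List String)) (Candidate_item_sets : List (List String × Int)) (Set_Length : Int) (min_sup : Int), Dom_Compare_Candidate_Sets_to_DataBase Data_base Candidate_item_sets Set_Length min_sup → Pre_Compare_Candidate_Sets_to_DataBase Data_base Candidate_item_sets Set_Length min_sup → Spec_Compare_Candidate_Sets_to_DataBase Data_base Candidate_item_sets Set_Length min_sup (Compare_Candidate_Sets_to_DataBase Data_base Candidate_item_sets Set_Length min_sup)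

-- ===== LEMMAS AND PROOFS =====

-- A's fold over a list of subsets adds, to each (unique-keyed) entry, the number of occurrences of its key
theorem cssFoldA_items (ss : List (List String)) (d : PySem.Dict (List String) Int)
    (hnd : d.keys.Nodup) :
    (ss.foldl cssStepA d).items = d.items.map (fun p => (p.1, p.2 + (ss.count p.1 : Int))) := by
  induction ss generalizing d with
  | nil => simp
  | cons s ss ih =>
    simp only [List.foldl_cons]
    rcases h : d.get? s with _ | v
    · have hstep : cssStepA d s = d := by simp [cssStepA, h]
      rw [hstep, ih d hnd]
      refine List.map_congr_left (fun p hp => ?_)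
      obtain ⟨pk, pv⟩ := p
      have hps : pk ≠ s := by
        intro hh
        have h2 := PySem.Dict.get?_of_mem_items d hp hnd
        rw [hh, h] at h2
        simp at h2
      have hps' : ¬ s = pk := fun hh => hps hh.symm
      simp [hps']
    · have hc : d.contains s = true := by
        rw [PySem.Dict.contains_eq_isSome_get?, h]; rfl
      have hstep : cssStepA d s = d.insert s (v + 1) := by simp [cssStepA, h]
      have hkeys := PySem.Dict.keys_insert_of_contains d (v + 1) hc
      have hnd' : (d.insert s (v + 1)).keys.Nodup := hkeys ▸ hnd
      rw [hstep, ih _ hnd', PySem.Dict.items_insert_of_contains d (v + 1) hc, List.map_map]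
      refine List.map_congr_left (fun p hp => ?_)
      obtain ⟨pk, pv⟩ := p
      by_cases hps : pk = s
      · have h2 := PySem.Dict.get?_of_mem_items d hp hnd
        rw [hps] at h2
        rw [h] at h2
        have hv : pv = v := (Option.some.inj h2).symm
        subst hps; subst hv
        simp [Function.comp, List.count_cons_self]
        ring
      · have hps' : ¬ s = pk := fun hh => hps hh.symm
        simp [Function.comp, hps, hps']

-- B's second pass over d's own (unique) keys adds g(key) to each entry
theorem cssFoldB_items (g : List String → Int) (ks : List (List String))
    (d : PySem.Dict (List String) Int) (hnd : d.keys.Nodup) (hks : ks.Nodup)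
    (hsub : ∀ k ∈ ks, d.contains k = true) :
    (ks.foldl (fun d key => d.insert key (d.getD key 0 + g key)) d).items
      = d.items.map (fun p => if p.1 ∈ ks then (p.1, p.2 + g p.1) else p) := by
  induction ks generalizing d with
  | nil => simp
  | cons k ks ih =>
    simp only [List.foldl_cons]
    have hck : d.contains k = true := hsub k (by simp)
    have hkeys := PySem.Dict.keys_insert_of_contains d (d.getD k 0 + g k) hck
    have hnd' : (d.insert k (d.getD k 0 + g k)).keys.Nodup := hkeys ▸ hnd
    have hks' : ks.Nodup := hks.of_cons
    have hknks : k ∉ ks := (List.nodup_cons.mp hks).1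
    have hsub' : ∀ x ∈ ks, (d.insert k (d.getD k 0 + g k)).contains x = true := by
      intro x hx
      have hx2 := hsub x (List.mem_cons_of_mem _ hx)
      rw [PySem.Dict.contains_iff_mem_keys] at hx2 ⊢
      rw [hkeys]; exact hx2
    rw [ih _ hnd' hks' hsub', PySem.Dict.items_insert_of_contains d (d.getD k 0 + g k) hck,
      List.map_map]
    refine List.map_congr_left (fun p hp => ?_)
    obtain ⟨pk, pv⟩ := p
    by_cases hpk : pk = k
    · have hv : d.getD pk 0 = pv := PySem.Dict.getD_of_mem_items d hp hnd 0
      subst hpk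
      simp [Function.comp, hknks, hv]
    · have hpk' : ¬ k = pk := fun hh => hpk hh.symm
      simp [Function.comp, hpk, List.mem_cons]

-- nested loop over a list of lists = one loop over the flattened list
theorem foldl_foldl_flatMap {α β γ : Type} (l : List α) (g : α → List β)
    (f : γ → β → γ) (a : γ) :
    l.foldl (fun a x => (g x).foldl f a) a = (l.flatMap g).foldl f a := by
  induction l generalizing a with
  | nil => rfl
  | cons x l ih => simp [List.flatMap_cons, List.foldl_append, ih]

-- ===== VERDICT (by name: the statement is the Claim_ definition above) =====
theorem Compare_Candidate_Sets_to_DataBase_spec : Claim_equal_Compare_Candidate_Sets_to_DataBase := by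
  intro DB C L ms _hdom hpre
  obtain ⟨-, hnodup⟩ := hpre
  unfold Spec_Compare_Candidate_Sets_to_DataBase
  unfold Compare_Candidate_Sets_to_DataBase Compare_Candidate_Sets_to_DataBase_alt
  have hnd0 : (PySem.Dict.mk C).keys.Nodup := by
    simpa [PySem.Dict.keys_mk] using hnodup
  -- A side: one-element range, then flatten the nested loop
  have hA : (DB.foldl (fun d item =>
      (PySem.List.pyRange L (L + 1) 1).foldl (fun d L' =>
        (pyCombinations item L'.toNat).foldl cssStepA d) d) (PySem.Dict.mk C))
      = (DB.flatMap (fun item => pyCombinations item L.toNat)).foldl cssStepA (PySem.Dict.mk C) := by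
    simp only [PySem.List.pyRange_one_singleton, List.foldl_cons, List.foldl_nil]
    exact foldl_foldl_flatMap DB (fun item => pyCombinations item L.toNat) cssStepA _
  rw [hA, cssFoldA_items _ _ hnd0]
  -- B side: the counter fold is the counter of the flattened list
  have hcounts : (DB.foldl (fun c item =>
      (pyCombinations item L.toNat).foldl
        (fun c combo => c.insert combo (c.getD combo 0 + 1)) c) PySem.Dict.empty)
      = PySem.Dict.counter (DB.flatMap (fun item => pyCombinations item L.toNat)) := by
    rw [← PySem.Dict.foldl_insert_getD_add_one_eq_counter, ← foldl_foldl_flatMap]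
  simp only [hcounts]
  rw [cssFoldB_items (fun k => (PySem.Dict.counter (DB.flatMap (fun item => pyCombinations item L.toNat))).getD k 0)
        (PySem.Dict.mk C).keys (PySem.Dict.mk C) hnd0 hnd0
        (fun k hk => (PySem.Dict.contains_iff_mem_keys _ _).mpr hk)]
  refine List.map_congr_left (fun p hp => ?_)
  have hk : p.1 ∈ (PySem.Dict.mk C).keys := PySem.Dict.mem_keys_of_mem_items _ hp
  rw [if_pos hk]
  simp [PySem.Dict.getD_counter]
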